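-- pv_equiv track=rewrite | github.com/FoodXDevelopment/FoodBlock | sdk/python/foodblock/vocabulary.py | _compute_unmatched
-- ===== SOURCE A (Python) =====
-- def _compute_unmatched(text, consumed_spans):
--     """Compute remaining text segments not covered by consumed spans."""
--     if not consumed_spans:
--         words = text.split()
--         return words if words else []
--
--     # Merge overlapping spans
--     spans = sorted(consumed_spans)
--     merged = [spans[0]]
--     for start, end in spans[1:]:
--         if start <= merged[-1][1]:
--             merged[-1] = (merged[-1][0], max(merged[-1][1], end))
--         else:
--             merged.append((start, end))
--
--     # Collect text outside consumed spans
--     remaining = []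
--     pos = 0
--     for start, end in merged:
--         segment = text[pos:start].strip()
--         if segment:
--             remaining.extend(segment.split())
--         pos = end
--     tail = text[pos:].strip()
--     if tail:
--         remaining.extend(tail.split())
--
--     return remaining
-- ===== SOURCE B (Python) =====
-- def _fuse(s, e, blocks):
--     """Prepend block (s, e), absorbing following blocks that it reaches."""
--     if blocks and blocks[0][0] <= e:
--         return _fuse(s, max(e, blocks[0][1]), blocks[1:])
--     return [(s, e)] + blocks
--
-- def _insert_span(blocks, span):
--     """Insert one span into the maintained block list, fusing locally."""
--     if not blocks:
--         return [span]
--     s, e = span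
--     bs, be = blocks[0]
--     if (s, e) < (bs, be):
--         return _fuse(s, e, blocks)
--     if s <= be:
--         return _fuse(bs, max(be, e), blocks[1:])
--     return [(bs, be)] + _insert_span(blocks[1:], span)
--
-- def _compute_unmatched(text, consumed_spans):
--     """Compute remaining text segments not covered by consumed spans."""
--     if not consumed_spans:
--         return text.split()
--     # Incremental interval insertion: no sort, no merge sweep; each span is
--     # placed into a maintained block list, fusing with the blocks it touches.
--     blocks = []
--     for span in consumed_spans:
--         blocks = _insert_span(blocks, span)
--     pieces = []
--     pos = 0
--     for s, e in blocks:
--         pieces.append(text[pos:s])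
--         pos = e
--     pieces.append(text[pos:])
--     return " ".join(pieces).split()
-- ===== Notes on version B (the rewrite author's own statement) =====
-- stated objective: alternative
-- what changed: B drops the sort-then-sweep entirely: it maintains a merged block list incrementally, inserting each span where it belongs and locally fusing the blocks it touches (recursive interval insertion), then emits the gap slices and splits them with one join+split instead of A's per-segment strip/test/extend accumulation.
import Mathlib
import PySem

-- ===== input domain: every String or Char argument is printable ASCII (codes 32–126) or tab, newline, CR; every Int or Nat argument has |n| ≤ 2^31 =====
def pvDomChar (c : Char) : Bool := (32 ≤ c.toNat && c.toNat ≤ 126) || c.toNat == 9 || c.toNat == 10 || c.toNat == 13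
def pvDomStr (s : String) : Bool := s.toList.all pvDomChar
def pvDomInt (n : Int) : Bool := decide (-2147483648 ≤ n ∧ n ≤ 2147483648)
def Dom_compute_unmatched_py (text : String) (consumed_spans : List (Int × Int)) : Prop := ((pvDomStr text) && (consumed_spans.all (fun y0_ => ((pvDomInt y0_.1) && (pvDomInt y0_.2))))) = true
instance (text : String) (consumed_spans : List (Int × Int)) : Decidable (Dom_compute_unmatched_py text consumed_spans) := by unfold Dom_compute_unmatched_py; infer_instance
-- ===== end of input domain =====

-- B replaces A's sort-then-merge-sweep by incremental interval insertion (each span is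
-- inserted into a maintained block list and fused locally) and A's per-segment
-- strip/test/extend accumulation by one join-and-split of the raw gap slices.

-- ===== PORT A =====

-- loop body of A's span-merging loop: 'if start <= merged[-1][1]: … else: merged.append(…)'
def pyMergeStep (merged : List (Int × Int)) (se : Int × Int) : List (Int × Int) :=
  if se.1 ≤ merged.getLast!.2 then
    merged.dropLast ++ [(merged.getLast!.1, max merged.getLast!.2 se.2)]
  else merged ++ [se]

-- loop body of A's collection loop: slice, strip, conditional extend, pos := end
def pyCollectStep (text : String) (st : List String × Int) (se : Int × Int) : List String × Int :=
  let segment := PySem.Str.strip (PySem.Str.slice text (some st.2) (some se.1))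
  (if segment ≠ "" then st.1 ++ PySem.Str.split₀ segment else st.1, se.2)

def compute_unmatched_py (text : String) (consumed_spans : List (Int × Int)) : List String :=
  if consumed_spans = [] then
    let words := PySem.Str.split₀ text
    if words = [] then [] else words
  else
    match PySem.List.sorted2 consumed_spans Prod.fst Prod.snd with
    | [] => []  -- unreachable: sorted2 permutes the (here nonempty) input
    | first :: restSpans =>
      let merged := restSpans.foldl pyMergeStep [first]
      let st := merged.foldl (pyCollectStep text) ([], 0)
      let tl := PySem.Str.strip (PySem.Str.slice text (some st.2) none)
      if tl ≠ "" then st.1 ++ PySem.Str.split₀ tl else st.1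

-- ===== PORT B =====

-- Python tuple comparison '(s, e) < (bs, be)'
def pyTupLt (a b : Int × Int) : Bool := a.1 < b.1 || (a.1 == b.1 && a.2 < b.2)

-- B's _fuse: prepend block (s, e), absorbing following blocks that it reaches
def pyFuseB (s e : Int) : List (Int × Int) → List (Int × Int)
  | [] => [(s, e)]
  | (bs, be) :: rest => if bs ≤ e then pyFuseB s (max e be) rest else (s, e) :: (bs, be) :: rest

-- B's _insert_span: place one span into the maintained block list, fusing locally
def pyInsertSpan (blocks : List (Int × Int)) (span : Int × Int) : List (Int × Int) :=
  match blocks with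
  | [] => [span]
  | (bs, be) :: rest =>
    if pyTupLt span (bs, be) then pyFuseB span.1 span.2 ((bs, be) :: rest)
    else if span.1 ≤ be then pyFuseB bs (max be span.2) rest
    else (bs, be) :: pyInsertSpan rest span

-- loop body of B's pieces loop: append the gap slice, pos := end
def pyPieceStep (text : String) (st : List String × Int) (se : Int × Int) : List String × Int :=
  (st.1 ++ [PySem.Str.slice text (some st.2) (some se.1)], se.2)

def compute_unmatched_py_alt (text : String) (consumed_spans : List (Int × Int)) : List String :=
  if consumed_spans = [] then PySem.Str.split₀ text
  else
    let blocks := consumed_spans.foldl pyInsertSpan []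
    let st := blocks.foldl (pyPieceStep text) ([], 0)
    let pieces := st.1 ++ [PySem.Str.slice text (some st.2) none]
    PySem.Str.split₀ (PySem.Str.join " " pieces)

-- ===== PRECONDITION & SPEC =====
def Spec_compute_unmatched_py (text : String) (consumed_spans : List (Int × Int)) (out : List String) : Prop := out = compute_unmatched_py_alt text consumed_spans
instance (text : String) (consumed_spans : List (Int × Int)) (out : List String) : Decidable (Spec_compute_unmatched_py text consumed_spans out) := by unfold Spec_compute_unmatched_py; infer_instance

-- ===== CLAIM (what is proved, stated in full; the proofs are below) =====
def Claim_equal_compute_unmatched_py : Prop := ∀ (text : String) (consumed_spans : List (Int × Int)), Dom_compute_unmatched_py text consumed_spans → Spec_compute_unmatched_py text consumed_spans (compute_unmatched_py text consumed_spans)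

-- ===== LEMMAS AND PROOFS =====
-- (everything below is proof machinery; nothing here is referenced by the claim)

-- canonical merged-block function on a sorted span list: open block (s, e), remaining spans
def pvGo (s e : Int) : List (Int × Int) → List (Int × Int)
  | [] => [(s, e)]
  | (s2, e2) :: t => if s2 ≤ e then pvGo s (max e e2) t else (s, e) :: pvGo s2 e2 t

def pvBlk : List (Int × Int) → List (Int × Int)
  | [] => []
  | (s, e) :: t => pvGo s e t

-- fused end of the first block and the remaining blocks
def pvBigE (s e : Int) : List (Int × Int) → Int
  | [] => e
  | (s2, e2) :: t => if s2 ≤ e then pvBigE s (max e e2) t else e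

def pvRest (s e : Int) : List (Int × Int) → List (Int × Int)
  | [] => []
  | (s2, e2) :: t => if s2 ≤ e then pvRest s (max e e2) t else pvGo s2 e2 t

-- sortedness invariant of the insertion sort (b before a is false = a ≤ b lexicographically)
def pvR (a b : Int × Int) : Prop := pyTupLt b a = false

-- gap list of a merged-interval list m scanned from position p, and the final position
def pvAdj : List (Int × Int) → Int → List (Int × Int)
  | [], _ => []
  | (s, e) :: t, p => (p, s) :: pvAdj t e

def pvEnd : List (Int × Int) → Int → Int
  | [], p => p
  | (_, e) :: t, _ => pvEnd t e

-- the words contributed by one gap (a, b): split of text[a:b]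
def pvSegWords (cs : List Char) (g : Int × Int) : List (List Char) :=
  PySem.Chars.split₀ (PySem.Chars.slice cs (some g.1) (some g.2))

theorem pyTupLt_iff (a b : Int × Int) :
    pyTupLt a b = true ↔ (a.1 < b.1 ∨ (a.1 = b.1 ∧ a.2 < b.2)) := by
  simp [pyTupLt]

theorem pyTupLt_false_iff (a b : Int × Int) :
    pyTupLt a b = false ↔ (b.1 < a.1 ∨ (b.1 = a.1 ∧ b.2 ≤ a.2)) := by
  rw [← Bool.not_eq_true, pyTupLt_iff]; omega

-- A's merge loop is pvGo
theorem pv_merge_foldl (t : List (Int × Int)) :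
    ∀ (acc : List (Int × Int)) (s e : Int),
    t.foldl pyMergeStep (acc ++ [(s, e)]) = acc ++ pvGo s e t := by
  induction t with
  | nil => intro acc s e; simp [pvGo]
  | cons a t ih =>
      intro acc s e
      obtain ⟨s2, e2⟩ := a
      rw [List.foldl_cons]
      by_cases h : s2 ≤ e
      · have : pyMergeStep (acc ++ [(s, e)]) (s2, e2) = acc ++ [(s, max e e2)] := by
          simp [pyMergeStep, h]
        rw [this, ih acc s (max e e2)]
        simp [pvGo, h]
      · have : pyMergeStep (acc ++ [(s, e)]) (s2, e2) = (acc ++ [(s, e)]) ++ [(s2, e2)] := by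
          simp [pyMergeStep, h]
        rw [this, ih (acc ++ [(s, e)]) s2 e2]
        simp [pvGo, h]

-- prepending a block to a merged list = fusing it in
theorem pv_fuse_go (t : List (Int × Int)) :
    ∀ (a b s e : Int), pvGo a b ((s, e) :: t) = pyFuseB a b (pvGo s e t) := by
  induction t with
  | nil =>
      intro a b s e
      by_cases h : s ≤ b <;> simp [pvGo, pyFuseB, h]
  | cons x t ih =>
      intro a b s e
      obtain ⟨s2, e2⟩ := x
      by_cases h2 : s2 ≤ e
      · have hg : pvGo s e ((s2, e2) :: t) = pvGo s (max e e2) t := by simp [pvGo, h2]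
        rw [hg, ← ih a b s (max e e2)]
        by_cases hb : s ≤ b
        · have h2' : s2 ≤ max b e := by omega
          rw [show pvGo a b ((s, e) :: (s2, e2) :: t) = pvGo a (max (max b e) e2) t by
            simp [pvGo, hb, h2']]
          rw [show pvGo a b ((s, max e e2) :: t) = pvGo a (max b (max e e2)) t by
            simp [pvGo, hb]]
          congr 1; omega
        · simp [pvGo, hb, h2]
      · have hg : pvGo s e ((s2, e2) :: t) = (s, e) :: pvGo s2 e2 t := by simp [pvGo, h2]
        rw [hg]
        by_cases hb : s ≤ b
        · have : pyFuseB a b ((s, e) :: pvGo s2 e2 t) = pyFuseB a (max b e) (pvGo s2 e2 t) := by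
            simp [pyFuseB, hb]
          rw [this, ← ih a (max b e) s2 e2]
          simp [pvGo, hb, h2]
        · have : pyFuseB a b ((s, e) :: pvGo s2 e2 t) = (a, b) :: (s, e) :: pvGo s2 e2 t := by
            simp [pyFuseB, hb]
          rw [this]
          simp [pvGo, hb, h2]

theorem pv_go_split (t : List (Int × Int)) :
    ∀ (s e : Int), pvGo s e t = (s, pvBigE s e t) :: pvRest s e t := by
  induction t with
  | nil => intro s e; simp [pvGo, pvBigE, pvRest]
  | cons x t ih =>
      intro s e
      obtain ⟨s2, e2⟩ := x
      by_cases h : s2 ≤ e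
      · simp [pvGo, pvBigE, pvRest, h, ih]
      · simp [pvGo, pvBigE, pvRest, h]

theorem pv_le_bigE (t : List (Int × Int)) : ∀ (s e : Int), e ≤ pvBigE s e t := by
  induction t with
  | nil => intro s e; simp [pvBigE]
  | cons x t ih =>
      intro s e
      obtain ⟨s2, e2⟩ := x
      by_cases h : s2 ≤ e
      · have := ih s (max e e2); simp [pvBigE, h]; omega
      · simp [pvBigE, h]

-- bumping the open end of the current block = fusing into the already-built blocks
theorem pv_bump (t : List (Int × Int)) :
    ∀ (s e b : Int), e ≤ b →
    pvGo s b t = pyFuseB s (max b (pvBigE s e t)) (pvRest s e t) := by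
  induction t with
  | nil =>
      intro s e b hb
      simp [pvGo, pvBigE, pvRest, pyFuseB]
      omega
  | cons x t ih =>
      intro s e b hb
      obtain ⟨s2, e2⟩ := x
      by_cases h : s2 ≤ e
      · have h' : s2 ≤ b := by omega
        have := ih s (max e e2) (max b e2) (by omega)
        rw [show pvGo s b ((s2, e2) :: t) = pvGo s (max b e2) t by simp [pvGo, h'], this]
        have hE : max e e2 ≤ pvBigE s (max e e2) t := pv_le_bigE t s (max e e2)
        have : max (max b e2) (pvBigE s (max e e2) t) = max b (pvBigE s (max e e2) t) := by omega
        rw [this]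
        simp [pvBigE, pvRest, h]
      · have hE : pvBigE s e ((s2, e2) :: t) = e := by simp [pvBigE, h]
        have hR : pvRest s e ((s2, e2) :: t) = pvGo s2 e2 t := by simp [pvRest, h]
        rw [hE, hR, show max b e = b by omega, ← pv_fuse_go t s b s2 e2]

-- a span landing inside the open block just bumps its end
theorem pv_abs (t : List (Int × Int)) (s e : Int) (x : Int × Int)
    (h1 : s ≤ x.1) (h2 : x.1 ≤ e) (h3 : x.1 = s → e ≤ x.2) :
    pyInsertSpan (pvGo s e t) x = pvGo s (max e x.2) t := by
  obtain ⟨x1, x2⟩ := x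
  simp only at h1 h2 h3
  have hse : s ≤ e := by omega
  have hE : e ≤ pvBigE s e t := pv_le_bigE t s e
  rw [pv_go_split t s e]
  by_cases hcut : pyTupLt (x1, x2) (s, pvBigE s e t) = true
  · have hx1 : x1 = s := by
      rcases (pyTupLt_iff (x1, x2) (s, pvBigE s e t)).mp hcut with h | ⟨h, _⟩ <;> omega
    have hex2 : e ≤ x2 := h3 hx1
    have : pyInsertSpan ((s, pvBigE s e t) :: pvRest s e t) (x1, x2)
        = pyFuseB x1 x2 ((s, pvBigE s e t) :: pvRest s e t) := by
      simp [pyInsertSpan, hcut]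
    rw [this, hx1]
    have : pyFuseB s x2 ((s, pvBigE s e t) :: pvRest s e t)
        = pyFuseB s (max x2 (pvBigE s e t)) (pvRest s e t) := by
      simp [pyFuseB]; omega
    rw [this, pv_bump t s e (max e x2) (by omega)]
    congr 1; omega
  · have hcut' : pyTupLt (x1, x2) (s, pvBigE s e t) = false := by
      revert hcut; cases pyTupLt (x1, x2) (s, pvBigE s e t) <;> simp
    have : pyInsertSpan ((s, pvBigE s e t) :: pvRest s e t) (x1, x2)
        = pyFuseB s (max (pvBigE s e t) x2) (pvRest s e t) := by
      simp [pyInsertSpan, hcut', show x1 ≤ pvBigE s e t by omega]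
    rw [this, pv_bump t s e (max e x2) (by omega)]
    congr 1; omega

-- insertBy preserves the sortedness invariant
theorem pv_pairwise_insertBy (x : Int × Int) (l : List (Int × Int))
    (h : l.Pairwise pvR) : (PySem.List.insertBy pyTupLt x l).Pairwise pvR := by
  induction l with
  | nil => simp [PySem.List.insertBy, pvR]
  | cons y t ih =>
      rcases List.pairwise_cons.mp h with ⟨hy, ht⟩
      by_cases hxy : pyTupLt x y = true
      · rw [show PySem.List.insertBy pyTupLt x (y :: t) = x :: y :: t by
          simp [PySem.List.insertBy, hxy]]
        refine List.pairwise_cons.mpr ⟨?_, h⟩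
        intro z hz
        rcases List.mem_cons.mp hz with rfl | hz
        · unfold pvR; rw [pyTupLt_false_iff]
          rcases (pyTupLt_iff x z).mp hxy with h | ⟨h, h'⟩ <;> omega
        · have hyz := hy z hz
          unfold pvR at hyz ⊢
          rw [pyTupLt_false_iff] at hyz ⊢
          rcases (pyTupLt_iff x y).mp hxy with h | ⟨h, h'⟩ <;> omega
      · rw [show PySem.List.insertBy pyTupLt x (y :: t) = y :: PySem.List.insertBy pyTupLt x t by
          simp [PySem.List.insertBy, hxy]]
        refine List.pairwise_cons.mpr ⟨?_, ih ht⟩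
        intro z hz
        rw [PySem.List.mem_insertBy] at hz
        rcases hz with rfl | hz
        · unfold pvR
          revert hxy; cases pyTupLt z y <;> simp
        · exact hy z hz

-- the heart: inserting a span into a sorted list commutes with blockification
theorem pv_insert_go (x : Int × Int) (t : List (Int × Int)) :
    ∀ (s e : Int), pyTupLt x (s, e) = false → ((s, e) :: t).Pairwise pvR →
    pvGo s e (PySem.List.insertBy pyTupLt x t) = pyInsertSpan (pvGo s e t) x := by
  induction t with
  | nil =>
      intro s e hxse _
      obtain ⟨x1, x2⟩ := x
      rw [pyTupLt_false_iff] at hxse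
      simp only at hxse
      show pvGo s e [(x1, x2)] = pyInsertSpan [(s, e)] (x1, x2)
      have hlt : pyTupLt (x1, x2) (s, e) = false := by rw [pyTupLt_false_iff]; simpa using hxse
      by_cases hx : x1 ≤ e
      · simp [pvGo, pyInsertSpan, pyFuseB, hx, hlt]
      · simp [pvGo, pyInsertSpan, hx, hlt]
  | cons y t' ih =>
      intro s e hxse hsort
      obtain ⟨s2, e2⟩ := y
      rcases List.pairwise_cons.mp hsort with ⟨hhead, hsort'⟩
      have hs2 : pvR (s, e) (s2, e2) := hhead _ (by simp)
      unfold pvR at hs2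
      rw [pyTupLt_false_iff] at hs2 hxse
      simp only at hs2 hxse
      by_cases hcx : pyTupLt x (s2, e2) = true
      · -- x is inserted right here
        rw [show PySem.List.insertBy pyTupLt x ((s2, e2) :: t') = x :: (s2, e2) :: t' by
          simp [PySem.List.insertBy, hcx]]
        obtain ⟨x1, x2⟩ := x
        rw [pyTupLt_iff] at hcx
        simp only at hcx hxse
        by_cases hx : x1 ≤ e
        · -- x lands in the open block
          rw [show pvGo s e ((x1, x2) :: (s2, e2) :: t') = pvGo s (max e x2) ((s2, e2) :: t') by
            simp [pvGo, hx]]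
          rw [pv_abs ((s2, e2) :: t') s e (x1, x2) (by omega) hx (by intro h; omega)]
        · -- x starts a new block after the open one
          have h2e : ¬ s2 ≤ e := by omega
          rw [show pvGo s e ((x1, x2) :: (s2, e2) :: t')
              = (s, e) :: pvGo x1 x2 ((s2, e2) :: t') by simp [pvGo, hx]]
          rw [show pvGo s e ((s2, e2) :: t') = (s, e) :: pvGo s2 e2 t' by simp [pvGo, h2e]]
          have hlt : pyTupLt (x1, x2) (s, e) = false := by
            rw [pyTupLt_false_iff]; simpa using hxse
          rw [show pyInsertSpan ((s, e) :: pvGo s2 e2 t') (x1, x2)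
              = (s, e) :: pyInsertSpan (pvGo s2 e2 t') (x1, x2) by
            simp [pyInsertSpan, hlt, hx]]
          congr 1
          rw [pv_fuse_go t' x1 x2 s2 e2, pv_go_split t' s2 e2]
          have hE2 : e2 ≤ pvBigE s2 e2 t' := pv_le_bigE t' s2 e2
          have hcut : pyTupLt (x1, x2) (s2, pvBigE s2 e2 t') = true := by
            rw [pyTupLt_iff]; simp only; omega
          simp [pyInsertSpan, hcut, pyFuseB]
      · -- x goes further right
        have hcx' : pyTupLt x (s2, e2) = false := by
          revert hcx; cases pyTupLt x (s2, e2) <;> simp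
        rw [show PySem.List.insertBy pyTupLt x ((s2, e2) :: t')
            = (s2, e2) :: PySem.List.insertBy pyTupLt x t' by
          simp [PySem.List.insertBy, hcx]]
        have hcxf := (pyTupLt_false_iff x (s2, e2)).mp hcx'
        simp only at hcxf
        by_cases h2 : s2 ≤ e
        · -- the next span fuses into the open block
          rw [show pvGo s e ((s2, e2) :: PySem.List.insertBy pyTupLt x t')
              = pvGo s (max e e2) (PySem.List.insertBy pyTupLt x t') by simp [pvGo, h2]]
          rw [show pvGo s e ((s2, e2) :: t') = pvGo s (max e e2) t' by simp [pvGo, h2]]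
          refine ih s (max e e2) ?_ ?_
          · rw [pyTupLt_false_iff]; simp only; omega
          · refine List.pairwise_cons.mpr ⟨?_, (List.pairwise_cons.mp hsort').2⟩
            intro z hz
            have hz1 := hhead z (by simp [hz])
            have hz2 := (List.pairwise_cons.mp hsort').1 z hz
            unfold pvR at hz1 hz2 ⊢
            rw [pyTupLt_false_iff] at hz1 hz2 ⊢
            simp only at hz1 hz2 ⊢
            omega
        · -- the next span starts its own block
          rw [show pvGo s e ((s2, e2) :: PySem.List.insertBy pyTupLt x t')
              = (s, e) :: pvGo s2 e2 (PySem.List.insertBy pyTupLt x t') by simp [pvGo, h2]]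
          rw [show pvGo s e ((s2, e2) :: t') = (s, e) :: pvGo s2 e2 t' by simp [pvGo, h2]]
          obtain ⟨x1, x2⟩ := x
          simp only at hcxf hxse
          have hlt : pyTupLt (x1, x2) (s, e) = false := by
            rw [pyTupLt_false_iff]; simpa using hxse
          have hx1e : ¬ x1 ≤ e := by omega
          rw [show pyInsertSpan ((s, e) :: pvGo s2 e2 t') (x1, x2)
              = (s, e) :: pyInsertSpan (pvGo s2 e2 t') (x1, x2) by
            simp [pyInsertSpan, hlt, hx1e]]
          congr 1
          exact ih s2 e2 hcx' hsort'

theorem pv_insert_blk (x : Int × Int) (l : List (Int × Int)) (h : l.Pairwise pvR) :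
    pvBlk (PySem.List.insertBy pyTupLt x l) = pyInsertSpan (pvBlk l) x := by
  cases l with
  | nil => obtain ⟨x1, x2⟩ := x; simp [PySem.List.insertBy, pvBlk, pvGo, pyInsertSpan]
  | cons y t =>
      obtain ⟨s, e⟩ := y
      by_cases hxy : pyTupLt x (s, e) = true
      · rw [show PySem.List.insertBy pyTupLt x ((s, e) :: t) = x :: (s, e) :: t by
          simp [PySem.List.insertBy, hxy]]
        obtain ⟨x1, x2⟩ := x
        show pvGo x1 x2 ((s, e) :: t) = pyInsertSpan (pvGo s e t) (x1, x2)
        rw [pv_fuse_go t x1 x2 s e, pv_go_split t s e]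
        have hE : e ≤ pvBigE s e t := pv_le_bigE t s e
        rw [pyTupLt_iff] at hxy
        simp only at hxy
        have hcut : pyTupLt (x1, x2) (s, pvBigE s e t) = true := by
          rw [pyTupLt_iff]; simp only; omega
        simp [pyInsertSpan, hcut, pyFuseB]
      · have hxy' : pyTupLt x (s, e) = false := by
          revert hxy; cases pyTupLt x (s, e) <;> simp
        rw [show PySem.List.insertBy pyTupLt x ((s, e) :: t)
            = (s, e) :: PySem.List.insertBy pyTupLt x t by simp [PySem.List.insertBy, hxy]]
        exact pv_insert_go x t s e hxy' h

-- B's insertion fold computes the blockification of the insertion sort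
theorem pv_fold_insert (spans : List (Int × Int)) :
    ∀ (acc : List (Int × Int)), acc.Pairwise pvR →
    spans.foldl pyInsertSpan (pvBlk acc)
      = pvBlk (spans.foldl (fun a x => PySem.List.insertBy pyTupLt x a) acc) := by
  induction spans with
  | nil => intro acc _; rfl
  | cons x t ih =>
      intro acc hacc
      rw [List.foldl_cons, List.foldl_cons, ← pv_insert_blk x acc hacc]
      exact ih _ (pv_pairwise_insertBy x acc hacc)

-- sorted2 with the (fst, snd) key IS the insertion-sort fold with pyTupLt
theorem pv_sorted2_eq (spans : List (Int × Int)) :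
    PySem.List.sorted2 spans Prod.fst Prod.snd
      = spans.foldl (fun a x => PySem.List.insertBy pyTupLt x a) [] := by
  have hfun : (fun (a b : Int × Int) =>
      decide (a.1 < b.1) || (!decide (b.1 < a.1) && decide (a.2 < b.2))) = pyTupLt := by
    funext a b
    simp only [pyTupLt]
    by_cases h1 : a.1 < b.1 <;> by_cases h2 : b.1 < a.1 <;> by_cases h3 : a.1 = b.1 <;>
      first | omega | simp [h1, h2, h3]
  show spans.foldl (fun acc x => PySem.List.insertBy _ x acc) [] = _
  rw [hfun]
  simp

-- ---- phase 2: gap slicing and word splitting ----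

-- the two defining equations of PySem.Chars.split₀.go, as rewrite rules
theorem pv_go_nil (cur : List Char) (acc : List (List Char)) :
    PySem.Chars.split₀.go [] cur acc
      = if cur.isEmpty then acc.reverse else (cur.reverse :: acc).reverse := by
  rw [PySem.Chars.split₀.go.eq_def]

theorem pv_go_cons (c : Char) (rest cur : List Char) (acc : List (List Char)) :
    PySem.Chars.split₀.go (c :: rest) cur acc
      = if PySem.Chars.isspace c then
          (if cur.isEmpty then PySem.Chars.split₀.go rest [] acc
           else PySem.Chars.split₀.go rest [] (cur.reverse :: acc))
        else PySem.Chars.split₀.go rest (c :: cur) acc := by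
  rw [PySem.Chars.split₀.go.eq_def]

theorem pv_go_all_space (t : List Char) (ht : ∀ c ∈ t, PySem.Chars.isspace c = true) :
    ∀ cur acc, PySem.Chars.split₀.go t cur acc = PySem.Chars.split₀.go [] cur acc := by
  induction t with
  | nil => intro cur acc; rfl
  | cons c r ih =>
      intro cur acc
      have hc : PySem.Chars.isspace c = true := ht c (by simp)
      have hr : ∀ x ∈ r, PySem.Chars.isspace x = true := fun x hx => ht x (by simp [hx])
      rw [pv_go_cons, if_pos hc]
      by_cases hcur : cur.isEmpty = true
      · rw [if_pos hcur, ih hr, pv_go_nil, pv_go_nil]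
        simp [hcur]
      · rw [if_neg hcur, ih hr, pv_go_nil, pv_go_nil]
        simp [hcur]

theorem pv_go_acc (s : List Char) :
    ∀ cur acc, PySem.Chars.split₀.go s cur acc
      = acc.reverse ++ PySem.Chars.split₀.go s cur [] := by
  induction s with
  | nil =>
      intro cur acc
      rw [pv_go_nil, pv_go_nil]
      by_cases hcur : cur.isEmpty = true <;> simp [hcur]
  | cons c r ih =>
      intro cur acc
      rw [pv_go_cons, pv_go_cons]
      by_cases hc : PySem.Chars.isspace c = true
      · rw [if_pos hc, if_pos hc]
        by_cases hcur : cur.isEmpty = true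
        · rw [if_pos hcur, if_pos hcur]; exact ih _ _
        · rw [if_neg hcur, if_neg hcur, ih [] (cur.reverse :: acc), ih [] [cur.reverse]]
          simp
      · rw [if_neg hc, if_neg hc]; exact ih _ _

theorem pv_go_append_space (a : List Char) (c : Char) (hc : PySem.Chars.isspace c = true)
    (b : List Char) : ∀ cur acc,
    PySem.Chars.split₀.go (a ++ c :: b) cur acc
      = PySem.Chars.split₀.go b [] ((PySem.Chars.split₀.go a cur acc).reverse) := by
  induction a with
  | nil =>
      intro cur acc
      rw [List.nil_append, pv_go_cons, if_pos hc, pv_go_nil]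
      by_cases hcur : cur.isEmpty = true
      · rw [if_pos hcur, if_pos hcur, List.reverse_reverse]
      · rw [if_neg hcur, if_neg hcur, List.reverse_reverse]
  | cons x r ih =>
      intro cur acc
      rw [List.cons_append, pv_go_cons, pv_go_cons]
      by_cases hx : PySem.Chars.isspace x = true
      · rw [if_pos hx, if_pos hx]
        by_cases hcur : cur.isEmpty = true
        · rw [if_pos hcur, if_pos hcur, ih]
        · rw [if_neg hcur, if_neg hcur, ih]
      · rw [if_neg hx, if_neg hx, ih]

theorem pv_go_trailing (s t : List Char) (ht : ∀ c ∈ t, PySem.Chars.isspace c = true) :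
    ∀ cur acc, PySem.Chars.split₀.go (s ++ t) cur acc = PySem.Chars.split₀.go s cur acc := by
  induction s with
  | nil => intro cur acc; simpa using pv_go_all_space t ht cur acc
  | cons x r ih =>
      intro cur acc
      rw [List.cons_append, pv_go_cons, pv_go_cons]
      by_cases hx : PySem.Chars.isspace x = true
      · rw [if_pos hx, if_pos hx]
        by_cases hcur : cur.isEmpty = true
        · rw [if_pos hcur, if_pos hcur, ih]
        · rw [if_neg hcur, if_neg hcur, ih]
      · rw [if_neg hx, if_neg hx, ih]

theorem pv_split₀_append_space (a b : List Char) (c : Char)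
    (hc : PySem.Chars.isspace c = true) :
    PySem.Chars.split₀ (a ++ c :: b) = PySem.Chars.split₀ a ++ PySem.Chars.split₀ b := by
  unfold PySem.Chars.split₀
  rw [pv_go_append_space a c hc b [] [], pv_go_acc b [] ((PySem.Chars.split₀.go a [] []).reverse)]
  simp

theorem pv_split₀_lstrip (s : List Char) :
    PySem.Chars.split₀ (PySem.Chars.lstrip s) = PySem.Chars.split₀ s := by
  unfold PySem.Chars.lstrip
  induction s with
  | nil => rfl
  | cons c r ih =>
      by_cases hc : PySem.Chars.isspace c = true
      · rw [List.dropWhile_cons_of_pos hc, ih]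
        unfold PySem.Chars.split₀
        rw [pv_go_cons, if_pos hc, if_pos (by simp : ([]:List Char).isEmpty = true)]
      · rw [List.dropWhile_cons_of_neg (by simp_all)]

theorem pv_split₀_rstrip (s : List Char) :
    PySem.Chars.split₀ (PySem.Chars.rstrip s) = PySem.Chars.split₀ s := by
  unfold PySem.Chars.rstrip
  have hdecomp : (List.dropWhile PySem.Chars.isspace s.reverse).reverse
      ++ (List.takeWhile PySem.Chars.isspace s.reverse).reverse = s := by
    rw [← List.reverse_append, List.takeWhile_append_dropWhile, List.reverse_reverse]
  have ht : ∀ c ∈ (List.takeWhile PySem.Chars.isspace s.reverse).reverse,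
      PySem.Chars.isspace c = true := by
    intro c hcmem
    exact List.mem_takeWhile_imp (List.mem_reverse.mp hcmem)
  conv_rhs => rw [← hdecomp]
  unfold PySem.Chars.split₀
  rw [pv_go_trailing _ _ ht]

theorem pv_split₀_strip (s : List Char) :
    PySem.Chars.split₀ (PySem.Chars.strip s) = PySem.Chars.split₀ s := by
  unfold PySem.Chars.strip
  rw [pv_split₀_rstrip, pv_split₀_lstrip]

theorem pv_split₀_of_strip_nil (s : List Char) (h : PySem.Chars.strip s = []) :
    PySem.Chars.split₀ s = [] := by
  rw [← pv_split₀_strip, h]; rfl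

theorem pv_split₀_join (parts : List (List Char)) :
    PySem.Chars.split₀ (PySem.Chars.join [' '] parts)
      = (parts.map PySem.Chars.split₀).flatten := by
  induction parts with
  | nil => rfl
  | cons x t ih =>
      cases t with
      | nil => simp [PySem.Chars.join, List.intercalate]
      | cons y r =>
          have hstep : PySem.Chars.join [' '] (x :: y :: r)
              = x ++ ' ' :: PySem.Chars.join [' '] (y :: r) := by
            simp [PySem.Chars.join, List.intercalate, List.intersperse]
          rw [hstep, pv_split₀_append_space _ _ ' ' (by decide), ih]
          simp

-- words contributed by one of A's conditional extends, at the List Char level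
theorem pv_collect_piece (x : String) (rem : List String) :
    List.map String.toList
        (if PySem.Str.strip x ≠ "" then rem ++ PySem.Str.split₀ (PySem.Str.strip x) else rem)
      = List.map String.toList rem ++ PySem.Chars.split₀ x.toList := by
  by_cases h : PySem.Str.strip x = ""
  · have h' : PySem.Chars.strip x.toList = [] := by
      rw [← PySem.Str.toList_strip, h]; rfl
    simp [h, pv_split₀_of_strip_nil _ h']
  · rw [if_pos h]
    rw [List.map_append, PySem.Str.split₀_map_toList, PySem.Str.toList_strip,
      pv_split₀_strip]

-- A's collection loop, characterised by pvAdj/pvEnd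
theorem pv_A_collect (text : String) (m : List (Int × Int)) :
    ∀ (rem : List String) (pos : Int),
    (m.foldl (pyCollectStep text) (rem, pos)).2 = pvEnd m pos ∧
    List.map String.toList (m.foldl (pyCollectStep text) (rem, pos)).1
      = List.map String.toList rem
        ++ ((pvAdj m pos).map (pvSegWords text.toList)).flatten := by
  induction m with
  | nil => intro rem pos; simp [pvAdj, pvEnd]
  | cons a t ih =>
      intro rem pos
      obtain ⟨s, e⟩ := a
      rw [List.foldl_cons]
      have hstep : pyCollectStep text (rem, pos) (s, e)
          = (if PySem.Str.strip (PySem.Str.slice text (some pos) (some s)) ≠ "" then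
              rem ++ PySem.Str.split₀ (PySem.Str.strip (PySem.Str.slice text (some pos) (some s)))
            else rem, e) := rfl
      rw [hstep]
      refine ⟨(ih _ _).1, ?_⟩
      rw [(ih _ _).2, pv_collect_piece]
      simp [pvAdj, pvSegWords, PySem.Str.toList_slice]

-- B's pieces loop, characterised by pvAdj/pvEnd
theorem pv_B_pieces (text : String) (m : List (Int × Int)) :
    ∀ (pcs : List String) (pos : Int),
    m.foldl (pyPieceStep text) (pcs, pos)
      = (pcs ++ (pvAdj m pos).map (fun g => PySem.Str.slice text (some g.1) (some g.2)),
         pvEnd m pos) := by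
  induction m with
  | nil => intro pcs pos; simp [pvAdj, pvEnd]
  | cons a t ih =>
      intro pcs pos
      obtain ⟨s, e⟩ := a
      rw [List.foldl_cons, show pyPieceStep text (pcs, pos) (s, e)
          = (pcs ++ [PySem.Str.slice text (some pos) (some s)], e) from rfl, ih]
      simp [pvAdj, pvEnd]

-- ===== VERDICT (by name: the statement is the Claim_ definition above) =====
theorem compute_unmatched_py_spec : Claim_equal_compute_unmatched_py := by
  intro text consumed_spans _hdom
  unfold Spec_compute_unmatched_py
  by_cases hempty : consumed_spans = []
  · simp only [compute_unmatched_py, compute_unmatched_py_alt, hempty, if_true]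
    by_cases hw : PySem.Str.split₀ text = [] <;> simp [hw]
  · simp only [compute_unmatched_py, compute_unmatched_py_alt, hempty, if_false]
    -- the two merged block lists coincide
    have hmerged : consumed_spans.foldl pyInsertSpan []
        = pvBlk (PySem.List.sorted2 consumed_spans Prod.fst Prod.snd) := by
      rw [pv_sorted2_eq]
      exact pv_fold_insert consumed_spans [] (by simp)
    cases hL : PySem.List.sorted2 consumed_spans Prod.fst Prod.snd with
    | nil =>
        have hP := PySem.List.sorted2_perm consumed_spans Prod.fst Prod.snd false
        rw [hL] at hP
        exact absurd hP.symm.eq_nil hempty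
    | cons first restSpans =>
        obtain ⟨s0, e0⟩ := first
        rw [hL] at hmerged
        have hblk : pvBlk ((s0, e0) :: restSpans) = pvGo s0 e0 restSpans := rfl
        have hA1 : restSpans.foldl pyMergeStep [(s0, e0)] = pvGo s0 e0 restSpans := by
          have := pv_merge_foldl restSpans [] s0 e0
          simpa using this
        rw [hblk] at hmerged
        set m := pvGo s0 e0 restSpans with hm
        -- A's side
        dsimp only
        rw [hA1]
        have hA := pv_A_collect text m [] 0
        -- B's side
        rw [hmerged, pv_B_pieces text m [] 0]
        have hinj : ∀ (u v : List String), u.map String.toList = v.map String.toList → u = v :=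
          fun u v h => List.map_injective_iff.mpr (fun a b hab => String.toList_inj.mp hab) h
        refine hinj _ _ ?_
        rw [pv_collect_piece, hA.1, hA.2]
        have hsp : (" " : String).toList = [' '] := by decide
        simp only [List.nil_append, PySem.Str.split₀_map_toList, PySem.Str.toList_join, hsp,
          List.map_map, List.map_append, List.map_cons, List.map_nil, pv_split₀_join,
          PySem.Str.toList_slice]
        rw [List.flatten_append]
        simp only [List.flatten_cons, List.flatten_nil, List.append_nil]
        refine congrArg₂ (· ++ ·) ?_ rfl
        refine congrArg List.flatten (List.map_congr_left ?_)
        intro g _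
        simp [pvSegWords, PySem.Str.toList_slice, Function.comp]
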